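-- pv_equiv track=rewrite | github.com/canaokar/rag-module | lab-03-chunking/solution/step4.py | heading_chunk
-- ===== SOURCE A (Python) =====
-- def heading_chunk(text):
--     """Split text by ## headings, returning content strings."""
--     lines = text.split("\n")
--     chunks = []
--     current_heading = None
--     current_lines = []
--
--     for line in lines:
--         if line.startswith("## "):
--             if current_heading is not None:
--                 content = "\n".join(current_lines).strip()
--                 if content:
--                     chunks.append(content)
--             current_heading = line.strip("# ").strip()
--             current_lines = []
--         elif current_heading is not None:
--             current_lines.append(line)
--
--     if current_heading is not None:
--         content = "\n".join(current_lines).strip()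
--         if content:
--             chunks.append(content)
--
--     return chunks
-- ===== SOURCE B (Python) =====
-- def heading_chunk(text):
--     """Split text by ## headings, returning content strings."""
--     def is_heading(line):
--         return line.startswith("## ")
--
--     lines = text.split("\n")
--     # drop the preamble before the first heading
--     while lines and not is_heading(lines[0]):
--         lines = lines[1:]
--
--     chunks = []
--     while lines:
--         # lines[0] is a heading; gather its body up to the next heading
--         body = []
--         rest = lines[1:]
--         while rest and not is_heading(rest[0]):
--             body.append(rest[0])
--             rest = rest[1:]
--         content = "\n".join(body).strip()
--         if content:
--             chunks.append(content)
--         lines = rest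
--     return chunks
-- ===== Notes on version B (the rewrite author's own statement) =====
-- stated objective: simpler
-- what changed: Replaces the single-pass accumulator loop with its current_heading flag and pending-buffer finalization by a skip-preamble-then-repeatedly-take-section decomposition (outer loop per heading, inner scan gathering the body), dropping the unused current_heading value entirely.
import Mathlib
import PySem

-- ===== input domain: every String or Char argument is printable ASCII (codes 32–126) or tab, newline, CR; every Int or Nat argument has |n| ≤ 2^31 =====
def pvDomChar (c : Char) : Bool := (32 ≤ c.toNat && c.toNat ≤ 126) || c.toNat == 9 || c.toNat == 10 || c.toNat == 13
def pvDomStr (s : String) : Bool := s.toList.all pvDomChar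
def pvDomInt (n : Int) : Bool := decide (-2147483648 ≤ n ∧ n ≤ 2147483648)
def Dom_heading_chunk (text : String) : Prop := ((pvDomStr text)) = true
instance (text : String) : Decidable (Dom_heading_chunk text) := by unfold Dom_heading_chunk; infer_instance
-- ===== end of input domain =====

-- B replaces A's single-pass flag/accumulator loop with a skip-preamble-then-take-each-section
-- decomposition (objective: simpler; the unused current_heading is dropped).

-- ===== PORT A =====
-- one step of A's for-loop; state = (chunks, current_heading, current_lines)
def hcStepA (s : List String × Option String × List String) (line : String) :
    List String × Option String × List String :=
  let chunks := s.1
  let cur := s.2.1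
  let curLines := s.2.2
  if PySem.Str.startswith line "## " then
    let chunks :=
      match cur with
      | some _ =>
          let content := PySem.Str.strip (PySem.Str.join "\n" curLines)
          if content ≠ "" then chunks ++ [content] else chunks
      | none => chunks
    (chunks, some (PySem.Str.strip (PySem.Str.stripChars line "# ")), [])
  else
    match cur with
    | some _ => (chunks, cur, curLines ++ [line])
    | none => (chunks, cur, curLines)

def heading_chunk (text : String) : List String :=
  let lines := (PySem.Str.split? text "\n").getD []
  let s := lines.foldl hcStepA ([], none, [])
  match s.2.1 with
  | some _ =>
      let content := PySem.Str.strip (PySem.Str.join "\n" s.2.2)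
      if content ≠ "" then s.1 ++ [content] else s.1
  | none => s.1

-- ===== PORT B =====
-- inner while-loop of B: split off the body lines before the next heading
def hcSpan : List String → List String × List String
  | [] => ([], [])
  | l :: ls =>
      if PySem.Str.startswith l "## " then ([], l :: ls)
      else
        let p := hcSpan ls
        (l :: p.1, p.2)

theorem hcSpan_snd_length_le (ls : List String) : (hcSpan ls).2.length ≤ ls.length := by
  induction ls with
  | nil => simp [hcSpan]
  | cons l ls ih =>
      simp only [hcSpan]
      split
      · simp
      · simpa using Nat.le_succ_of_le ih

-- B's first while-loop: drop the preamble before the first heading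
def hcDropPre : List String → List String
  | [] => []
  | l :: ls => if PySem.Str.startswith l "## " then l :: ls else hcDropPre ls

-- B's outer while-loop: one chunk per heading
def hcChunksOf : List String → List String
  | [] => []
  | _ :: ls =>
      let p := hcSpan ls
      let content := PySem.Str.strip (PySem.Str.join "\n" p.1)
      (if content ≠ "" then [content] else []) ++ hcChunksOf p.2
termination_by ls => ls.length
decreasing_by
  simpa using Nat.lt_succ_of_le (hcSpan_snd_length_le ls)

def heading_chunk_alt (text : String) : List String :=
  hcChunksOf (hcDropPre ((PySem.Str.split? text "\n").getD []))

-- ===== PRECONDITION & SPEC =====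
def Spec_heading_chunk (text : String) (out : List String) : Prop := out = heading_chunk_alt text
instance (text : String) (out : List String) : Decidable (Spec_heading_chunk text out) := by unfold Spec_heading_chunk; infer_instance

-- ===== CLAIM (what is proved, stated in full; the proofs are below) =====
def Claim_equal_heading_chunk : Prop := ∀ (text : String), Dom_heading_chunk text → Spec_heading_chunk text (heading_chunk text)

-- ===== LEMMAS AND PROOFS =====

-- finalize A's fold state
def hcFin (s : List String × Option String × List String) : List String :=
  match s.2.1 with
  | some _ =>
      let content := PySem.Str.strip (PySem.Str.join "\n" s.2.2)
      if content ≠ "" then s.1 ++ [content] else s.1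
  | none => s.1

def hcEmit (b : List String) : List String :=
  let content := PySem.Str.strip (PySem.Str.join "\n" b)
  if content ≠ "" then [content] else []

-- phase 2 invariant: once a heading has been seen, the fold produces the
-- pending chunk (buffer ++ body of the current section) then the remaining sections
theorem hcPhase2 (ls : List String) : ∀ (chunks buf : List String) (h : String),
    hcFin (ls.foldl hcStepA (chunks, some h, buf)) =
      chunks ++ hcEmit (buf ++ (hcSpan ls).1) ++ hcChunksOf (hcSpan ls).2 := by
  induction ls with
  | nil =>
      intro chunks buf h
      simp [hcFin, hcSpan, hcChunksOf, hcEmit]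
      split <;> simp
  | cons l ls ih =>
      intro chunks buf h
      by_cases hl : PySem.Str.startswith l "## "
      · simp only [List.foldl_cons, hcStepA, hcSpan, hl, if_true]
        rw [ih]
        simp only [hcChunksOf, hcEmit]
        simp
        split <;> simp
      · simp only [List.foldl_cons, hcStepA, hcSpan, hl, if_false, Bool.false_eq_true]
        rw [ih]
        simp

-- phase 1: before any heading, the state stays ([], none, []) and the result
-- is the chunks of the lines after the preamble
theorem hcPhase1 (ls : List String) :
    hcFin (ls.foldl hcStepA ([], none, [])) = hcChunksOf (hcDropPre ls) := by
  induction ls with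
  | nil => simp [hcFin, hcDropPre, hcChunksOf]
  | cons l ls ih =>
      by_cases hl : PySem.Str.startswith l "## "
      · simp only [List.foldl_cons, hcStepA, hcDropPre, hl, if_true]
        rw [hcPhase2]
        simp [hcChunksOf, hcEmit]
      · simp only [List.foldl_cons, hcStepA, hcDropPre, hl, if_false, Bool.false_eq_true]
        exact ih

-- ===== VERDICT (by name: the statement is the Claim_ definition above) =====
theorem heading_chunk_spec : Claim_equal_heading_chunk := by
  intro text _
  show heading_chunk text = heading_chunk_alt text
  unfold heading_chunk heading_chunk_alt
  exact hcPhase1 ((PySem.Str.split? text "\n").getD [])
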